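-- pv_equiv track=rewrite | github.com/jdnewmil/aocpy | aocpy/aoc2024/day06.py | positions_set_to_map
-- ===== SOURCE A (Python) =====
-- from typing import Optional, TypeAlias
--
-- GuardLoc: TypeAlias = tuple[int, int]
--
-- def positions_set_to_map(
--     grid_room: list[str]
--     , positions: set[GuardLoc]
--     , mark: str = 'X'
-- ) -> list[str]:
--     return [  # new list of strings
--         ''.join(  # pack new list of characters
--             [
--                 mark
--                 if (i, j) in positions
--                 else c
--                 for i, c in enumerate(row)])
--         for j, row in enumerate(grid_room)]
-- ===== SOURCE B (Python) =====
-- def positions_set_to_map(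
--     grid_room: list[str]
--     , positions: set
--     , mark: str = 'X'
-- ) -> list[str]:
--     rows = [list(r) for r in grid_room]
--     n = len(rows)
--     for i, j in positions:
--         if 0 <= j < n and 0 <= i < len(rows[j]):
--             rows[j][i] = mark
--     return [''.join(r) for r in rows]
-- ===== Notes on version B (the rewrite author's own statement) =====
-- stated objective: alternative
-- what changed: Instead of scanning every grid cell and membership-testing it against the set, B copies the grid into mutable rows and writes the mark only at the (bounds-checked) given positions, then re-joins the rows.
import Mathlib
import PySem

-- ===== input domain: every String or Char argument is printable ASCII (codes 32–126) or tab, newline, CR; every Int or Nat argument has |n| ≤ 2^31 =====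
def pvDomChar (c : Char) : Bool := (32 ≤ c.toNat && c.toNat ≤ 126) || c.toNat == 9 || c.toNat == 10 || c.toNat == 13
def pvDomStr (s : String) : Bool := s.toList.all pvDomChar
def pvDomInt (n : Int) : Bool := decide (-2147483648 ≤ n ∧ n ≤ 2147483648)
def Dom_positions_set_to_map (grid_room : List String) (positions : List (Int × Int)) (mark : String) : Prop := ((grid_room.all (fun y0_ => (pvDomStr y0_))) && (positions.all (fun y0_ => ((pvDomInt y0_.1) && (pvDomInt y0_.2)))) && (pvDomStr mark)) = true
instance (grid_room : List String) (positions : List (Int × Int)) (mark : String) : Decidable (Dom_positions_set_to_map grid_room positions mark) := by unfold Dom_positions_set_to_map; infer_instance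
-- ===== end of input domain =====

-- B overlays the marks by writing only at the given (bounds-checked) positions into mutable rows,
-- instead of A's scan of every cell with a membership test; alternative algorithm, same result.

-- ===== PORT A =====
-- A: per row j, per char i, emit mark if (i, j) ∈ positions else the char; ''.join packs each row.
def positions_set_to_map (grid_room : List String) (positions : List (Int × Int)) (mark : String) : List String :=
  (PySem.List.enumerate grid_room).map (fun jr =>
    PySem.Str.join "" ((PySem.List.enumerate jr.2.toList).map (fun ic =>
      if (ic.1, jr.1) ∈ positions then mark else String.ofList [ic.2])))

-- ===== PORT B =====
-- one position write: rows[j][i] = mark, guarded by 0 <= j < len(rows) and 0 <= i < len(rows[j])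
def pvMark (mark : String) (rows : List (List String)) (p : Int × Int) : List (List String) :=
  if 0 ≤ p.2 ∧ p.2 < (rows.length : Int) then
    if 0 ≤ p.1 ∧ p.1 < ((rows.getD p.2.toNat []).length : Int) then
      rows.set p.2.toNat ((rows.getD p.2.toNat []).set p.1.toNat mark)
    else rows
  else rows

def positions_set_to_map_alt (grid_room : List String) (positions : List (Int × Int)) (mark : String) : List String :=
  let rows := grid_room.map (fun r => r.toList.map (fun c => String.ofList [c]))
  (positions.foldl (pvMark mark) rows).map (fun r => PySem.Str.join "" r)

-- ===== PRECONDITION & SPEC =====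
def Spec_positions_set_to_map (grid_room : List String) (positions : List (Int × Int)) (mark : String) (out : List String) : Prop := out = positions_set_to_map_alt grid_room positions mark
instance (grid_room : List String) (positions : List (Int × Int)) (mark : String) (out : List String) : Decidable (Spec_positions_set_to_map grid_room positions mark out) := by unfold Spec_positions_set_to_map; infer_instance

-- ===== CLAIM (what is proved, stated in full; the proofs are below) =====
def Claim_equal_positions_set_to_map : Prop := ∀ (grid_room : List String) (positions : List (Int × Int)) (mark : String), Dom_positions_set_to_map grid_room positions mark → Spec_positions_set_to_map grid_room positions mark (positions_set_to_map grid_room positions mark)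

-- ===== LEMMAS AND PROOFS =====

lemma set_getD_self {α : Type} (l : List α) (j : Nat) (hj : j < l.length) (x d : α) :
    (l.set j x).getD j d = x := by
  rw [List.getD_eq_getElem?_getD, List.getElem?_set_self (by simpa using hj)]
  rfl

lemma set_getD_ne {α : Type} (l : List α) (jt j : Nat) (h : jt ≠ j) (x d : α) :
    (l.set jt x).getD j d = l.getD j d := by
  rw [List.getD_eq_getElem?_getD, List.getElem?_set_ne h, ← List.getD_eq_getElem?_getD]

lemma pvMark_length (m : String) (rows : List (List String)) (p : Int × Int) :
    (pvMark m rows p).length = rows.length := by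
  unfold pvMark; split_ifs <;> simp

lemma pvMark_row_length (m : String) (rows : List (List String)) (p : Int × Int) (j : Nat) :
    ((pvMark m rows p).getD j []).length = (rows.getD j []).length := by
  unfold pvMark
  split_ifs with h1 h2
  · by_cases hj : j = p.2.toNat
    · subst hj
      rw [set_getD_self _ _ (by omega)]
      simp
    · rw [set_getD_ne _ _ _ (fun h => hj h.symm)]
  · rfl
  · rfl

lemma pvMark_cell (m : String) (rows : List (List String)) (p : Int × Int)
    (j i : Nat) (hj : j < rows.length) (hi : i < (rows.getD j []).length) :
    ((pvMark m rows p).getD j []).getD i "" =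
      if p = ((i : Int), (j : Int)) then m else (rows.getD j []).getD i "" := by
  unfold pvMark
  by_cases hpj : 0 ≤ p.2 ∧ p.2 < (rows.length : Int)
  · rw [if_pos hpj]
    by_cases hpi : 0 ≤ p.1 ∧ p.1 < ((rows.getD p.2.toNat []).length : Int)
    · rw [if_pos hpi]
      by_cases hjj : p.2.toNat = j
      · rw [hjj, set_getD_self _ _ hj]
        by_cases hii : p.1.toNat = i
        · rw [hii, set_getD_self _ _ hi]
          have hp : p = ((i : Int), (j : Int)) := by
            have := hpi.1; have := hpj.1
            ext <;> simp <;> omega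
          rw [if_pos hp]
        · rw [set_getD_ne _ _ _ hii]
          have hp : p ≠ ((i : Int), (j : Int)) := by
            intro h; apply hii; rw [h]; simp
          rw [if_neg hp]
      · rw [set_getD_ne _ _ _ hjj]
        have hp : p ≠ ((i : Int), (j : Int)) := by
          intro h; apply hjj; rw [h]; simp
        rw [if_neg hp]
    · rw [if_neg hpi]
      have hp : p ≠ ((i : Int), (j : Int)) := by
        intro h
        apply hpi
        rw [h]
        refine ⟨Int.natCast_nonneg i, ?_⟩
        simpa using hi
      rw [if_neg hp]
  · rw [if_neg hpj]
    have hp : p ≠ ((i : Int), (j : Int)) := by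
      intro h
      apply hpj
      rw [h]
      exact ⟨Int.natCast_nonneg j, by simpa using hj⟩
    rw [if_neg hp]

lemma foldl_pvMark_length (m : String) (ps : List (Int × Int)) (rows : List (List String)) :
    (ps.foldl (pvMark m) rows).length = rows.length := by
  induction ps generalizing rows with
  | nil => rfl
  | cons p ps ih => simp only [List.foldl_cons]; rw [ih, pvMark_length]

lemma foldl_pvMark_row_length (m : String) (ps : List (Int × Int)) (rows : List (List String)) (j : Nat) :
    ((ps.foldl (pvMark m) rows).getD j []).length = (rows.getD j []).length := by
  induction ps generalizing rows with
  | nil => rfl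
  | cons p ps ih => simp only [List.foldl_cons]; rw [ih, pvMark_row_length]

lemma foldl_pvMark_cell (m : String) (ps : List (Int × Int)) :
    ∀ (rows : List (List String)) (j i : Nat), j < rows.length →
      i < (rows.getD j []).length →
    ((ps.foldl (pvMark m) rows).getD j []).getD i "" =
      if ((i : Int), (j : Int)) ∈ ps then m else (rows.getD j []).getD i "" := by
  induction ps with
  | nil => intro rows j i _ _; simp
  | cons p ps ih =>
    intro rows j i hj hi
    simp only [List.foldl_cons]
    rw [ih (pvMark m rows p) j i (by rw [pvMark_length]; exact hj)
        (by rw [pvMark_row_length]; exact hi),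
      pvMark_cell m rows p j i hj hi]
    by_cases hmem : ((i : Int), (j : Int)) ∈ ps
    · simp [hmem, List.mem_cons]
    · by_cases hp : p = ((i : Int), (j : Int))
      · simp [hp, hmem]
      · have hnot : ((i : Int), (j : Int)) ∉ (p :: ps) := by
          intro hmem2
          rcases List.mem_cons.mp hmem2 with h | h
          · exact hp h.symm
          · exact hmem h
        simp [hnot, hp, hmem]

-- ===== VERDICT (by name: the statement is the Claim_ definition above) =====
theorem positions_set_to_map_spec : Claim_equal_positions_set_to_map := by
  intro grid_room positions mark _
  unfold Spec_positions_set_to_map positions_set_to_map positions_set_to_map_alt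
  set rows0 : List (List String) :=
    grid_room.map (fun r => r.toList.map (fun c => String.ofList [c])) with hrows0
  have hlen0 : rows0.length = grid_room.length := by simp [hrows0]
  have hrow0 : ∀ (j : Nat) (hj : j < grid_room.length),
      rows0.getD j [] = (grid_room[j]'hj).toList.map (fun c => String.ofList [c]) := by
    intro j hj
    rw [hrows0, List.getD_eq_getElem?_getD, List.getElem?_map, List.getElem?_eq_getElem hj]
    rfl
  apply List.ext_getElem
  · simp [PySem.List.length_enumerate, foldl_pvMark_length, hlen0]
  · intro j hj1 hj2
    have hjg : j < grid_room.length := by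
      simpa [PySem.List.length_enumerate] using hj1
    rw [List.getElem_map, List.getElem_map, PySem.List.getElem_enumerate]
    simp only [Int.zero_add]
    congr 1
    have hFlen : ((positions.foldl (pvMark mark) rows0).getD j []).length =
        grid_room[j].toList.length := by
      rw [foldl_pvMark_row_length, hrow0 j hjg, List.length_map]
    rw [List.getElem_eq_getD ([] : List String)]
    apply List.ext_getElem
    · simp only [List.length_map, PySem.List.length_enumerate]
      exact hFlen.symm
    · intro i hi1 hi2
      have hig : i < grid_room[j].toList.length := by
        simpa [PySem.List.length_enumerate] using hi1
      rw [List.getElem_map, PySem.List.getElem_enumerate]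
      simp only [Int.zero_add]
      have hcell : ((positions.foldl (pvMark mark) rows0).getD j []).getD i "" =
          if ((i : Int), (j : Int)) ∈ positions then mark
          else String.ofList [(grid_room[j]'hjg).toList[i]'hig] := by
        rw [foldl_pvMark_cell mark positions rows0 j i (by omega)
          (by rw [hrow0 j hjg]; simpa using hig)]
        by_cases hmem : ((i : Int), (j : Int)) ∈ positions
        · simp [hmem]
        · simp only [hmem, if_false]
          rw [hrow0 j hjg, List.getD_eq_getElem (hn := by simpa using hig), List.getElem_map]
      conv_rhs => rw [List.getElem_eq_getD ""]
      rw [hcell]
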